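-- pv_equiv track=rewrite | github.com/drdaemos/advent-of-code | python/src/twenty_four/day_12.py | count_separate_edges
-- ===== SOURCE A (Python) =====
-- from typing import List, Dict, Set
--
-- def count_separate_edges(edges: Set[int]) -> int:
--     separate = 0
--     sorted_edges = sorted(edges)
--     prev = sorted_edges[0]
--
--     for edge in sorted_edges[1:]:
--         if edge - prev > 1:
--             separate += 1
--
--         prev = edge
--
--     if True:
--         separate += 1
--
--     return separate
-- ===== SOURCE B (Python) =====
-- def count_separate_edges(edges):
--     s = set(edges)
--     return sum(1 for x in s if x - 1 not in s)
-- ===== Notes on version B (the rewrite author's own statement) =====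
-- stated objective: alternative
-- what changed: Replaces sort-then-scan-for-gaps with a hash set and a count of run-starts (elements x with x-1 not in the set); no sort, one membership pass.
import Mathlib
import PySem

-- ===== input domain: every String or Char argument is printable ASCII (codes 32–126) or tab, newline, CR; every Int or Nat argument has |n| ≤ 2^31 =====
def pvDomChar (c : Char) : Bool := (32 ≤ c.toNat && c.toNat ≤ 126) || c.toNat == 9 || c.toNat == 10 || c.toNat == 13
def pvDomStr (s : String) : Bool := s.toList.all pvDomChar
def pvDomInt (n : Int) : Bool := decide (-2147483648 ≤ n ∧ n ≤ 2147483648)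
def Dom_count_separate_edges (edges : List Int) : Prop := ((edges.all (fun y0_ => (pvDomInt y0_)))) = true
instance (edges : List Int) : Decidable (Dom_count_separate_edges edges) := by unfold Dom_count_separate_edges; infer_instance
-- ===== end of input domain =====

-- B replaces A's sort-and-scan-for-gaps with a hash-set count of run-starts (x with x-1 not in the set): a different, sort-free algorithm.


-- ===== PORT A =====
def count_separate_edges (edges : List Int) : Int :=
  let sorted_edges := PySem.List.sorted edges (fun x => x) false
  match sorted_edges with
  | [] => 0   -- sorted_edges[0] raises IndexError here; excluded by Pre_
  | prev :: _ =>
    let st := (PySem.List.slice sorted_edges (some 1) none).foldl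
      (fun (st : Int × Int) edge =>
        ((if edge - st.2 > 1 then st.1 + 1 else st.1), edge))
      ((0 : Int), prev)
    st.1 + 1

-- ===== PORT B =====
def count_separate_edges_alt (edges : List Int) : Int :=
  let s := PySem.Set.ofList edges
  s.foldl (fun acc x => if PySem.Set.contains s (x - 1) then acc else acc + 1) 0

-- ===== PRECONDITION & SPEC =====
-- A raises IndexError on the empty list (sorted_edges[0]); Pre_ excludes exactly that input.
def Pre_count_separate_edges (edges : List Int) : Prop := edges ≠ []
instance (edges : List Int) : Decidable (Pre_count_separate_edges edges) := by unfold Pre_count_separate_edges; infer_instance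
def pvWitness_count_separate_edges : List Int := [3, 1, 2, 7]

def Spec_count_separate_edges (edges : List Int) (out : Int) : Prop := out = count_separate_edges_alt edges
instance (edges : List Int) (out : Int) : Decidable (Spec_count_separate_edges edges out) := by unfold Spec_count_separate_edges; infer_instance

-- ===== CLAIM (what is proved, stated in full; the proofs are below) =====
def Claim_equal_count_separate_edges : Prop := ∀ (edges : List Int), Dom_count_separate_edges edges → Pre_count_separate_edges edges → Spec_count_separate_edges edges (count_separate_edges edges)

-- ===== LEMMAS AND PROOFS =====

-- number of "run starts" of a finite set of ints
def runStarts (S : Finset Int) : Finset Int := S.filter (fun x => x - 1 ∉ S)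

-- A's loop on a sorted nonempty list counts the runs
theorem loopA_eq (t : List Int) : ∀ (p c : Int), (p :: t).Pairwise (· ≤ ·) →
    (t.foldl (fun (st : Int × Int) edge =>
        ((if edge - st.2 > 1 then st.1 + 1 else st.1), edge)) (c, p)).1 + 1
      = c + ((runStarts (p :: t).toFinset).card : Int) := by
  induction t with
  | nil =>
    intro p c _
    simp [runStarts, Finset.filter_singleton]
  | cons e t' ih =>
    intro p c hpw
    have hpe : p ≤ e := (List.pairwise_cons.mp hpw).1 e (by simp)
    have hpw' : (e :: t').Pairwise (· ≤ ·) := (List.pairwise_cons.mp hpw).2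
    have hmin' : ∀ y ∈ (e :: t').toFinset, e ≤ y := by
      intro y hy
      rcases List.mem_cons.mp (List.mem_toFinset.mp hy) with rfl | h
      · exact le_refl y
      · exact (List.pairwise_cons.mp hpw').1 y h
    simp only [List.foldl_cons]
    rw [ih e (if e - p > 1 then c + 1 else c) hpw']
    -- now a pure Finset fact about S = (p :: e :: t').toFinset vs S' = (e :: t').toFinset
    rw [show (p :: e :: t').toFinset = insert p (e :: t').toFinset from List.toFinset_cons ..]
    by_cases hpS : p ∈ (e :: t').toFinset
    · -- duplicate head: e = p, set unchanged
      have hep : e = p := le_antisymm (hmin' p hpS) hpe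
      rw [Finset.insert_eq_self.mpr hpS]
      have hif : ¬ (e - p > 1) := by omega
      simp [hif]
    · -- new strict minimum p
      have hlt : ∀ y ∈ (e :: t').toFinset, p < y := by
        intro y hy
        have h1 : e ≤ y := hmin' y hy
        have hne : p ≠ y := fun h => hpS (h ▸ hy)
        omega
      have hpltE : p < e := hlt e (by simp)
      have hkey : runStarts (insert p (e :: t').toFinset)
          = insert p ((runStarts (e :: t').toFinset).erase (p + 1)) := by
        ext x
        simp only [runStarts, Finset.mem_filter, Finset.mem_insert, Finset.mem_erase]
        constructor
        · rintro ⟨hx, hnx⟩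
          rcases hx with rfl | hxS
          · exact Or.inl rfl
          · refine Or.inr ⟨?_, hxS, ?_⟩
            · intro h; exact hnx (Or.inl (by omega))
            · intro h; exact hnx (Or.inr h)
        · rintro (rfl | ⟨hxne, hxS, hnx⟩)
          · refine ⟨Or.inl rfl, ?_⟩
            rintro (h | h)
            · omega
            · have := hlt _ h; omega
          · refine ⟨Or.inr hxS, ?_⟩
            rintro (h | h)
            · exact hxne (by omega)
            · exact hnx h
      have hpnotin : p ∉ (runStarts (e :: t').toFinset).erase (p + 1) := by
        intro h
        exact hpS (Finset.mem_of_mem_filter p (Finset.mem_of_mem_erase h))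
      rw [hkey, Finset.card_insert_of_notMem hpnotin]
      by_cases hp1 : p + 1 ∈ (e :: t').toFinset
      · -- e = p + 1, no gap; the erase removes a genuine run start
        have hep1 : e = p + 1 := by
          have h1 := hlt _ hp1
          have h2 := hmin' _ hp1
          omega
        have hmem : p + 1 ∈ runStarts (e :: t').toFinset := by
          refine Finset.mem_filter.mpr ⟨hp1, ?_⟩
          intro h
          have := hlt _ h; omega
        rw [Finset.card_erase_of_mem hmem]
        have hgap : ¬ (e - p > 1) := by omega
        have hpos : 0 < (runStarts (e :: t').toFinset).card := Finset.card_pos.mpr ⟨_, hmem⟩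
        simp only [hgap, if_false]
        push_cast [Nat.sub_add_cancel hpos]
        ring
      · -- gap: e ≥ p + 2
        have hgap : e - p > 1 := by
          have hne : e ≠ p + 1 := fun h => hp1 (h ▸ (by simp))
          omega
        have h2 : (runStarts (e :: t').toFinset).erase (p + 1) = runStarts (e :: t').toFinset :=
          Finset.erase_eq_of_notMem (fun h => hp1 (Finset.mem_of_mem_filter _ h))
        rw [h2]
        simp only [hgap, if_true]
        push_cast
        ring

-- B counts exactly |runStarts (toFinset edges)|
theorem altB_eq (edges : List Int) :
    count_separate_edges_alt edges = ((runStarts edges.toFinset).card : Int) := by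
  unfold count_separate_edges_alt
  have hnd : (PySem.Set.ofList edges).Nodup := PySem.Set.nodup_ofList edges
  have hfold : ∀ (l : List Int) (c : Int),
      l.foldl (fun acc x => if PySem.Set.contains (PySem.Set.ofList edges) (x - 1) then acc else acc + 1) c
        = c + ((l.countP (fun x => ! PySem.Set.contains (PySem.Set.ofList edges) (x - 1)) : Nat) : Int) := by
    intro l
    induction l with
    | nil => simp
    | cons a l ih =>
      intro c
      rw [List.foldl_cons, ih, List.countP_cons]
      by_cases h : PySem.Set.contains (PySem.Set.ofList edges) (a - 1) = true
      · simp only [h, if_true, Bool.not_true]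
        push_cast
        ring
      · simp only [Bool.not_eq_true] at h
        simp only [h, if_false, Bool.not_false]
        push_cast
        ring
  rw [hfold (PySem.Set.ofList edges) 0, zero_add]
  have hfil : ((PySem.Set.ofList edges).filter
      (fun x => ! PySem.Set.contains (PySem.Set.ofList edges) (x - 1))).toFinset
      = runStarts edges.toFinset := by
    ext x
    simp only [runStarts, List.mem_toFinset, List.mem_filter, Finset.mem_filter,
      List.mem_toFinset, Bool.not_eq_true', Bool.eq_false_iff, Ne, PySem.Set.contains_iff,
      PySem.Set.mem_ofList]
  rw [← hfil, List.toFinset_card_of_nodup (hnd.filter _), List.countP_eq_length_filter]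

-- ===== VERDICT (by name: the statement is the Claim_ definition above) =====
theorem count_separate_edges_spec : Claim_equal_count_separate_edges := by
  intro edges _ hpre
  unfold Spec_count_separate_edges count_separate_edges
  have hperm : (PySem.List.sorted edges (fun x => x) false).Perm edges :=
    PySem.List.sorted_perm edges (fun x => x) false
  have hne : PySem.List.sorted edges (fun x => x) false ≠ [] := by
    intro h
    exact hpre (List.Perm.eq_nil (h ▸ hperm).symm)
  obtain ⟨p, t, hpt⟩ := List.exists_cons_of_ne_nil hne
  have hpw : (p :: t).Pairwise (· ≤ ·) := by
    have h := PySem.List.sorted_pairwise (xs := edges) (key := fun x => x)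
    rw [hpt] at h
    simpa using h
  have hslice : PySem.List.slice (p :: t) (some 1) none = t := by
    rw [PySem.List.slice_from (p :: t) (by norm_num : (0:Int) ≤ 1)]
    simp
  simp only [hpt, hslice]
  rw [loopA_eq t p 0 hpw, altB_eq]
  have hfs : (p :: t).toFinset = edges.toFinset := by
    apply Finset.ext
    intro x
    simp only [List.mem_toFinset]
    exact (hpt ▸ hperm).mem_iff
  rw [hfs]
  ring
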